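-- pv_equiv track=rewrite | github.com/akhilravidas/advent-of-code | 2023/13.1.py | h_count
-- ===== SOURCE A (Python) =====
-- def h_count(pat):
--     res = []
--     L = len(pat)
--     for x in range(0, L):
--         found = True
--         once = False
--         for j in range(0, x + 1):
--             once = True
--             if x + j - 1 < L and pat[x - j] != pat[x + j - 1]:
--                 found = False
--
--         if found and once:
--             res.append(x)
--
--     return res
-- ===== SOURCE B (Python) =====
-- def h_count(pat):
--     L = len(pat)
--     res = []
--     for x in range(L):
--         m = min(x, L - x)
--         # adjacent pair must match (for x == 0 this wraps to pat[-1], as in A),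
--         # and the remaining prefix must mirror the suffix
--         if pat[x] == pat[x - 1] and pat[x - m:x] == pat[x:x + m][::-1]:
--             res.append(x)
--     return res
-- ===== Notes on version B (the rewrite author's own statement) =====
-- stated objective: faster
-- what changed: B checks each candidate line with one adjacent-pair test plus a direct comparison of the prefix slice against the reversed suffix slice (C-level list comparison that stops at the first mismatch), replacing A's inner Python index loop that keeps scanning with found/once flags after a mismatch.
import Mathlib
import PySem

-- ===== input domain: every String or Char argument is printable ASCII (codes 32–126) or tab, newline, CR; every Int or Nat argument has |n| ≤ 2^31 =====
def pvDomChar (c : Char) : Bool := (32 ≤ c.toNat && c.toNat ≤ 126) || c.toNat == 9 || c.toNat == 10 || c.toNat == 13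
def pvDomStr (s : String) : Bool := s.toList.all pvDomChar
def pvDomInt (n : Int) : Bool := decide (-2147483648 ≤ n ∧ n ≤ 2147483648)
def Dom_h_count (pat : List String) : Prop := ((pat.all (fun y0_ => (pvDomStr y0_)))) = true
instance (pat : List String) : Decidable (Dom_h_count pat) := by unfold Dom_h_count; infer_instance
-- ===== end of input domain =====

-- B finds horizontal reflection lines by comparing the reversed prefix slice with the suffix
-- slice for each candidate (plus the adjacent-pair test, whose pat[x-1] wraps to pat[-1] at
-- x = 0 exactly as A's own j = 0 comparison does), instead of A's inner index loop with
-- found/once flags.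

-- ===== PORT A =====
def h_count (pat : List String) : List Int :=
  let L : Int := pat.length
  (PySem.List.pyRange 0 L 1).foldl (fun res x =>
    let st := (PySem.List.pyRange 0 (x + 1) 1).foldl
      (fun (st : Bool × Bool) j =>
        (if x + j - 1 < L ∧ PySem.List.pyGet? pat (x - j) ≠ PySem.List.pyGet? pat (x + j - 1)
         then false else st.1, true)) (true, false)
    if st.1 && st.2 then res ++ [x] else res) []

-- ===== PORT B =====
-- pat[x:x+m][::-1] ported as (slice …).reverse (cf. PySem.List.slice?_none_none_neg_one)
def h_count_alt (pat : List String) : List Int :=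
  let L : Int := pat.length
  (PySem.List.pyRange 0 L 1).foldl (fun res x =>
    let m := min x (L - x)
    if PySem.List.pyGet? pat x = PySem.List.pyGet? pat (x - 1)
       ∧ PySem.List.slice pat (some (x - m)) (some x)
         = (PySem.List.slice pat (some x) (some (x + m))).reverse
    then res ++ [x] else res) []

-- ===== PRECONDITION & SPEC =====
def Spec_h_count (pat : List String) (out : List Int) : Prop := out = h_count_alt pat
instance (pat : List String) (out : List Int) : Decidable (Spec_h_count pat out) := by unfold Spec_h_count; infer_instance

-- ===== CLAIM (what is proved, stated in full; the proofs are below) =====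
def Claim_equal_h_count : Prop := ∀ (pat : List String), Dom_h_count pat → Spec_h_count pat (h_count pat)

-- ===== LEMMAS AND PROOFS =====

-- the Bool test A's inner loop computes for a candidate x
def condA (pat : List String) (x : Int) : Bool :=
  !((PySem.List.pyRange 0 (x + 1) 1).any
    (fun j => decide (x + j - 1 < (pat.length : Int) ∧
      PySem.List.pyGet? pat (x - j) ≠ PySem.List.pyGet? pat (x + j - 1))))

-- the Bool test B computes for a candidate x
def condB (pat : List String) (x : Int) : Bool :=
  decide (PySem.List.pyGet? pat x = PySem.List.pyGet? pat (x - 1)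
          ∧ PySem.List.slice pat (some (x - min x ((pat.length : Int) - x))) (some x)
            = (PySem.List.slice pat (some x) (some (x + min x ((pat.length : Int) - x)))).reverse)

theorem foldl_flag2 (C : Int → Prop) [DecidablePred C] (l : List Int) (b o : Bool) :
    l.foldl (fun (st : Bool × Bool) j => (if C j then false else st.1, true)) (b, o)
    = (b && !l.any (fun j => decide (C j)), o || !l.isEmpty) := by
  induction l generalizing b o with
  | nil => simp
  | cons a t ih =>
    simp only [List.foldl_cons, ih]
    by_cases h : C a <;> simp [h]

theorem h_count_eq_filter (pat : List String) :
    h_count pat = (PySem.List.pyRange 0 (pat.length : Int) 1).filter (condA pat) := by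
  unfold h_count
  rw [PySem.List.foldl_congr_mem (g := fun res x => if condA pat x then res ++ [x] else res)]
  · rw [PySem.List.foldl_append_if_eq_filter]; simp
  · intro acc x hx
    have hx0 : 0 ≤ x := (PySem.List.mem_pyRange_one.1 hx).1
    rw [foldl_flag2 (C := fun j => x + j - 1 < (pat.length : Int) ∧
      PySem.List.pyGet? pat (x - j) ≠ PySem.List.pyGet? pat (x + j - 1))]
    have hne : (PySem.List.pyRange 0 (x + 1) 1).isEmpty = false := by
      rw [PySem.List.pyRange_one_cons (by omega : (0:Int) < x + 1)]; rfl
    simp [hne, condA]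

theorem h_count_alt_eq_filter (pat : List String) :
    h_count_alt pat = (PySem.List.pyRange 0 (pat.length : Int) 1).filter (condB pat) := by
  unfold h_count_alt
  rw [PySem.List.foldl_congr_mem (g := fun res x => if condB pat x then res ++ [x] else res)]
  · rw [PySem.List.foldl_append_if_eq_filter]; simp
  · intro acc x hx
    simp [condB]

-- the mirror condition both tests amount to (over Nat indices)
def Mir (pat : List String) (n m : Nat) : Prop :=
  ∀ i : Nat, i < m → pat[n - 1 - i]? = pat[n + i]?

theorem condA_iff_Mir (pat : List String) (n : Nat) (h1 : 1 ≤ n) (h2 : n < pat.length) :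
    condA pat (n : Int) = true ↔ Mir pat n (min n (pat.length - n)) := by
  unfold condA Mir
  rw [Bool.not_eq_true', List.any_eq_false]
  constructor
  · intro H i hi
    have hi1 : i < n := lt_of_lt_of_le hi (Nat.min_le_left _ _)
    have hi2 : i < pat.length - n := lt_of_lt_of_le hi (Nat.min_le_right _ _)
    have hj : ((i : Int) + 1) ∈ PySem.List.pyRange 0 ((n : Int) + 1) 1 := by
      rw [PySem.List.mem_pyRange_one]; omega
    have hH := H _ hj
    simp only [decide_eq_true_eq] at hH
    push Not at hH
    have hb : (n : Int) + ((i : Int) + 1) - 1 < (pat.length : Int) := by omega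
    have this := hH hb
    have e1 : (n : Int) - ((i : Int) + 1) = ((n - 1 - i : Nat) : Int) := by omega
    have e2 : (n : Int) + ((i : Int) + 1) - 1 = ((n + i : Nat) : Int) := by omega
    rw [e1, e2, PySem.List.pyGet?_natCast, PySem.List.pyGet?_natCast] at this
    exact this
  · intro H j hj
    rw [PySem.List.mem_pyRange_one] at hj
    simp only [decide_eq_true_eq]
    push Not
    intro hb
    rcases eq_or_lt_of_le hj.1 with h0 | h0
    · -- j = 0 : pat[n] = pat[n-1], from Mir at i = 0
      have hm : 0 < min n (pat.length - n) := by omega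
      have := (H 0 hm).symm
      subst h0  -- hmm, h0 : 0 = j
      have e1 : (n : Int) - 0 = ((n : Nat) : Int) := by omega
      have e2 : (n : Int) + 0 - 1 = ((n - 1 - 0 : Nat) : Int) := by omega
      rw [e1, e2, PySem.List.pyGet?_natCast, PySem.List.pyGet?_natCast]
      simpa using this
    · -- 1 ≤ j
      obtain ⟨jn, rfl⟩ : ∃ jn : Nat, j = (jn : Int) := ⟨j.toNat, (Int.toNat_of_nonneg hj.1).symm⟩
      have hjn1 : 1 ≤ jn := by omega
      have hjn2 : jn ≤ n := by omega
      have hjn3 : jn ≤ pat.length - n := by omega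
      have hm : jn - 1 < min n (pat.length - n) := by omega
      have := H (jn - 1) hm
      have e1 : (n : Int) - (jn : Int) = ((n - 1 - (jn - 1) : Nat) : Int) := by omega
      have e2 : (n : Int) + (jn : Int) - 1 = ((n + (jn - 1) : Nat) : Int) := by omega
      rw [e1, e2, PySem.List.pyGet?_natCast, PySem.List.pyGet?_natCast]
      exact this

theorem condB_iff_Mir (pat : List String) (n : Nat) (h1 : 1 ≤ n) (h2 : n < pat.length) :
    condB pat (n : Int) = true ↔ Mir pat n (min n (pat.length - n)) := by
  unfold condB Mir
  have epair : (n : Int) - 1 = ((n - 1 : Nat) : Int) := by omega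
  rw [epair, PySem.List.pyGet?_natCast, PySem.List.pyGet?_natCast]
  set m : Nat := min n (pat.length - n) with hm
  have hmn : m ≤ n := Nat.min_le_left _ _
  have hmr : m ≤ pat.length - n := Nat.min_le_right _ _
  have hmint : min ((n : Int)) ((pat.length : Int) - (n : Int)) = (m : Int) := by
    simp only [hm]; omega
  rw [hmint]
  have e1 : (n : Int) - (m : Int) = ((n - m : Nat) : Int) := by omega
  have e2 : (n : Int) + (m : Int) = ((n + m : Nat) : Int) := by push_cast; ring
  rw [e1, e2, PySem.List.slice_natCast, PySem.List.slice_natCast]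
  have e3 : n - (n - m) = m := by omega
  have e4 : n + m - n = m := by omega
  rw [e3, e4]
  have len1 : ((pat.drop (n - m)).take m).length = m := by simp; omega
  have len2 : (((pat.drop n).take m).reverse).length = m := by simp; omega
  have ptA : ∀ i : Nat, i < m → ((pat.drop (n - m)).take m)[i]? = pat[n - m + i]? := by
    intro i hi
    rw [List.getElem?_take_of_lt hi, List.getElem?_drop]
  have ptB : ∀ i : Nat, i < m → (((pat.drop n).take m).reverse)[i]? = pat[n + m - 1 - i]? := by
    intro i hi
    rw [List.getElem?_reverse (by rw [List.length_take, List.length_drop]; omega)]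
    have : ((pat.drop n).take m).length - 1 - i = m - 1 - i := by
      simp only [List.length_take, List.length_drop]; omega
    rw [this, List.getElem?_take_of_lt (by omega), List.getElem?_drop]
    congr 1; omega
  rw [decide_eq_true_eq]
  constructor
  · intro HH i hi
    have H := HH.2
    have h' : ((pat.drop (n - m)).take m)[m - 1 - i]? = (((pat.drop n).take m).reverse)[m - 1 - i]? := by
      rw [H]
    rw [ptA _ (by omega), ptB _ (by omega)] at h'
    have ea : n - m + (m - 1 - i) = n - 1 - i := by omega
    have eb : n + m - 1 - (m - 1 - i) = n + i := by omega
    rw [ea, eb] at h'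
    exact h'
  · intro H
    refine ⟨?_, ?_⟩
    · -- the adjacent pair is the i = 0 instance of Mir
      have h0 := H 0 (by omega)
      simpa using h0.symm
    apply List.ext_getElem?
    intro i
    by_cases hi : i < m
    · rw [ptA _ hi, ptB _ hi]
      have := H (m - 1 - i) (by omega)
      have ea : n - 1 - (m - 1 - i) = n - m + i := by omega
      have eb : n + (m - 1 - i) = n + m - 1 - i := by omega
      rw [ea, eb] at this
      exact this
    · rw [List.getElem?_eq_none (by omega), List.getElem?_eq_none (by omega)]

theorem condA_eq_condB (pat : List String) (x : Int) (h1 : 1 ≤ x) (h2 : x < (pat.length : Int)) :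
    condA pat x = condB pat x := by
  obtain ⟨n, rfl⟩ : ∃ n : Nat, x = (n : Int) := ⟨x.toNat, (Int.toNat_of_nonneg (by omega)).symm⟩
  have h1' : 1 ≤ n := by omega
  have h2' : n < pat.length := by omega
  have := (condA_iff_Mir pat n h1' h2').trans (condB_iff_Mir pat n h1' h2').symm
  cases ha : condA pat (n : Int) <;> cases hb : condB pat (n : Int) <;> simp_all

theorem condA_zero (pat : List String) (h : pat ≠ []) :
    condA pat 0 = decide (pat.head? = pat.getLast?) := by
  unfold condA
  have hr : PySem.List.pyRange 0 ((0:Int) + 1) 1 = [0] := PySem.List.pyRange_one_singleton 0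
  rw [hr]
  have hL : 0 < pat.length := List.length_pos_iff.2 h
  simp only [List.any_cons, List.any_nil, Bool.or_false]
  rw [show (0:Int) + 0 - 1 = -1 by ring, show (0:Int) - 0 = 0 by ring]
  rw [PySem.List.pyGet?_neg_one, PySem.List.pyGet?_zero]
  have hb : (-1 : Int) < (pat.length : Int) := by omega
  have hh : pat[0]? = pat.head? := by
    cases pat with | nil => simp at h | cons a t => simp
  rw [hh]
  by_cases he : pat.head? = pat.getLast? <;> simp [he, hb]

theorem condB_zero (pat : List String) (h : pat ≠ []) :
    condB pat 0 = decide (pat.head? = pat.getLast?) := by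
  unfold condB
  have hm : min (0:Int) ((pat.length : Int) - 0) = 0 := by
    have : 0 < pat.length := List.length_pos_iff.2 h
    omega
  rw [hm, show (0:Int) - 0 = 0 by ring, show (0:Int) + 0 = 0 by ring,
      show (0:Int) - 1 = -1 by ring]
  rw [PySem.List.pyGet?_neg_one, PySem.List.pyGet?_zero]
  have hs : PySem.List.slice pat (some (0:Int)) (some (0:Int)) = ([] : List String) := by
    simp [PySem.List.slice_to pat (le_refl (0:Int))]
  rw [hs]
  have hh : pat[0]? = pat.head? := by
    cases pat with | nil => simp at h | cons a t => simp
  rw [hh]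
  by_cases he : pat.head? = pat.getLast? <;> simp [he]

-- ===== VERDICT (by name: the statement is the Claim_ definition above) =====
theorem h_count_spec : Claim_equal_h_count := by
  intro pat _
  unfold Spec_h_count
  rw [h_count_eq_filter, h_count_alt_eq_filter]
  refine List.filter_congr (fun x hx => ?_)
  have hx' := PySem.List.mem_pyRange_one.1 hx
  have hne : pat ≠ [] := by
    intro h; subst h; simp at hx'; omega
  rcases eq_or_lt_of_le hx'.1 with h0 | h0
  · rw [← h0, condA_zero pat hne, condB_zero pat hne]
  · exact condA_eq_condB pat x h0 hx'.2
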